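-- pv_equiv track=rewrite | github.com/mark-gold/luchanos | decorators/serious_sam/block_1/easy.py | multiply_and_modify
-- ===== SOURCE A (Python) =====
-- def multiply_and_modify(input_string: str, multiplier: int) -> str:
--     """
--
--     :param input_string: random string, let it be 'test'
--     :param multiplier: positive integer number, let it be 4
--     :return: string, in our case 'testTESTtestTEST'
--     """
--     if isinstance(input_string, str) is False:
--         raise ValueError('Incorrect type of input string, it must be string object.')
--     if isinstance(multiplier, int) is False:
--         raise ValueError('Incorrect type of multiplier, it must be positive integer object.')
--     if multiplier <= 0:
--         raise ValueError('Incorrect value of multiplier, it must be positive integer object.')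
--     list_with_values = [input_string if i % 2 == 0 else input_string.upper() for i in range(multiplier)]
--     return ''.join(list_with_values)
-- ===== SOURCE B (Python) =====
-- def multiply_and_modify(input_string: str, multiplier: int) -> str:
--     if isinstance(input_string, str) is False:
--         raise ValueError('Incorrect type of input string, it must be string object.')
--     if isinstance(multiplier, int) is False:
--         raise ValueError('Incorrect type of multiplier, it must be positive integer object.')
--     if multiplier <= 0:
--         raise ValueError('Incorrect value of multiplier, it must be positive integer object.')
--     block = input_string + input_string.upper()
--     result = block * (multiplier // 2)
--     if multiplier % 2 == 1:
--         result += input_string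
--     return result
-- ===== Notes on version B (the rewrite author's own statement) =====
-- stated objective: simpler
-- what changed: Replaces the per-index range loop with its parity test by closed-form string multiplication of the two-element block input_string + input_string.upper(), appending one lowercase copy when the multiplier is odd.
import Mathlib
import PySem

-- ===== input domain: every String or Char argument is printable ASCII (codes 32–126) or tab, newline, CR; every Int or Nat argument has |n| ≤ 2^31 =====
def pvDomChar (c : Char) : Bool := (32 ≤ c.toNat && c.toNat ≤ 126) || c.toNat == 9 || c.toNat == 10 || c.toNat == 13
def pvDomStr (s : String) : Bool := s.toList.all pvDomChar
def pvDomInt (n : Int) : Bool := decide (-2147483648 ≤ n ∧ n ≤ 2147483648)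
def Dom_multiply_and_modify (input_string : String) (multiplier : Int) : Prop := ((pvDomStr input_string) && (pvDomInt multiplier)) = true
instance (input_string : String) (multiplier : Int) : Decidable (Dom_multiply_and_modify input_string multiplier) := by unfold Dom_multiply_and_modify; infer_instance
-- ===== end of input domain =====

-- B replaces the per-index range loop (parity test on each index) with closed-form
-- repetition of the two-element block s + s.upper(), plus one lowercase copy when the
-- multiplier is odd; objective: simpler.


-- ===== PORT A =====
-- list_with_values = [input_string if i % 2 == 0 else input_string.upper() for i in range(multiplier)]
-- return ''.join(list_with_values)
def multiply_and_modify (input_string : String) (multiplier : Int) : String :=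
  let list_with_values :=
    (PySem.List.pyRange 0 multiplier 1).map
      (fun i => if PySem.Int.mod i 2 = 0 then input_string else PySem.Str.upper input_string)
  PySem.Str.join "" list_with_values

-- ===== PORT B =====
-- block = input_string + input_string.upper(); result = block * (multiplier // 2);
-- if multiplier % 2 == 1: result += input_string
def multiply_and_modify_alt (input_string : String) (multiplier : Int) : String :=
  let block := input_string.toList ++ (PySem.Str.upper input_string).toList
  let result := PySem.List.pyRepeat block (PySem.Int.floordiv multiplier 2)
  if PySem.Int.mod multiplier 2 = 1 then String.ofList (result ++ input_string.toList)
  else String.ofList result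

-- ===== PRECONDITION & SPEC =====
-- A raises ValueError when multiplier <= 0; exactly those inputs are excluded.
def Pre_multiply_and_modify (input_string : String) (multiplier : Int) : Prop := 0 < multiplier
instance (input_string : String) (multiplier : Int) : Decidable (Pre_multiply_and_modify input_string multiplier) := by unfold Pre_multiply_and_modify; infer_instance
def pvWitness_multiply_and_modify : String × Int := ("test", 4)

def Spec_multiply_and_modify (input_string : String) (multiplier : Int) (out : String) : Prop := out = multiply_and_modify_alt input_string multiplier
instance (input_string : String) (multiplier : Int) (out : String) : Decidable (Spec_multiply_and_modify input_string multiplier out) := by unfold Spec_multiply_and_modify; infer_instance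

-- ===== CLAIM (what is proved, stated in full; the proofs are below) =====
def Claim_equal_multiply_and_modify : Prop := ∀ (input_string : String) (multiplier : Int), Dom_multiply_and_modify input_string multiplier → Pre_multiply_and_modify input_string multiplier → Spec_multiply_and_modify input_string multiplier (multiply_and_modify input_string multiplier)

-- ===== LEMMAS AND PROOFS =====

-- The flattened parity-alternating list over range n equals (a++b) repeated n/2 times,
-- plus a final a when n is odd.
lemma alt_flatten (a b : List Char) :
    ∀ n : Nat,
      (List.map (fun k : Nat => if k % 2 = 0 then a else b) (List.range n)).flatten =
        (List.replicate (n / 2) (a ++ b)).flatten ++ (if n % 2 = 1 then a else []) := by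
  intro n
  induction n with
  | zero => simp
  | succ n ih =>
    rw [List.range_succ, List.map_append, List.flatten_append, ih]
    rcases Nat.even_or_odd n with he | ho
    · have h2 : n % 2 = 0 := Nat.even_iff.mp he
      have hs2 : (n + 1) % 2 = 1 := by omega
      have hd : (n + 1) / 2 = n / 2 := by omega
      simp [h2, hs2, hd]
    · have h2 : n % 2 = 1 := Nat.odd_iff.mp ho
      have hs2 : (n + 1) % 2 = 0 := by omega
      have hd : (n + 1) / 2 = n / 2 + 1 := by omega
      simp [h2, hs2, hd, List.replicate_succ' (n := n / 2), List.flatten_append]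

lemma join_empty_flatten (parts : List (List Char)) :
    PySem.Chars.join [] parts = parts.flatten := by
  unfold PySem.Chars.join List.intercalate
  induction parts with
  | nil => rfl
  | cons x rest ih =>
    cases rest with
    | nil => simp
    | cons y t => simp_all [List.intersperse]

theorem multiply_and_modify_spec : Claim_equal_multiply_and_modify := by
  intro s m _ hpre
  unfold Spec_multiply_and_modify multiply_and_modify multiply_and_modify_alt
  have hpre' : (0:Int) < m := hpre
  have hfd : PySem.Int.floordiv m 2 = ((m.toNat / 2 : Nat) : Int) := by
    rw [PySem.Int.floordiv_eq_iff_of_pos (by norm_num : (0:Int) < 2)]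
    constructor <;> omega
  have hmd : PySem.Int.mod m 2 = ((m.toNat % 2 : Nat) : Int) := by
    rcases PySem.Int.mod_two_eq m with h | h <;> rw [h]
    · have : (2:Int) ∣ m := (PySem.Int.mod_eq_zero_iff_dvd m 2).mp h
      omega
    · have : ¬ (2:Int) ∣ m := by
        intro hd
        rw [(PySem.Int.mod_eq_zero_iff_dvd m 2).mpr hd] at h
        exact absurd h (by norm_num)
      omega
  simp only [PySem.Str.join, PySem.List.pyRepeat, hfd, hmd]
  have hrange : PySem.List.pyRange 0 m 1 = (List.range m.toNat).map (fun k : Nat => (k : Int)) := by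
    rw [PySem.List.pyRange_one]
    simp
  rw [hrange, List.map_map, List.map_map]
  have hmap :
      (List.range m.toNat).map
          ((String.toList ∘ fun i : Int => if PySem.Int.mod i 2 = 0 then s else PySem.Str.upper s) ∘ (fun k : Nat => (k : Int))) =
        (List.range m.toNat).map
          (fun k : Nat => if k % 2 = 0 then s.toList else (PySem.Str.upper s).toList) := by
    apply List.map_congr_left
    intro k _
    have hk : PySem.Int.mod (k : Int) 2 = ((k % 2 : Nat) : Int) := by
      rcases PySem.Int.mod_two_eq (k : Int) with h | h <;> rw [h]
      · have : (2:Int) ∣ (k : Int) := (PySem.Int.mod_eq_zero_iff_dvd (k : Int) 2).mp h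
        omega
      · have : ¬ (2:Int) ∣ (k : Int) := by
          intro hd
          rw [(PySem.Int.mod_eq_zero_iff_dvd (k : Int) 2).mpr hd] at h
          exact absurd h (by norm_num)
        omega
    have hdv : (2:Int) ∣ (k : Int) ↔ k % 2 = 0 := by omega
    by_cases hk2 : k % 2 = 0 <;> simp [hdv, hk2]
  have hsep : ("" : String).toList = [] := rfl
  rw [hmap, hsep, join_empty_flatten, alt_flatten s.toList (PySem.Str.upper s).toList m.toNat]
  have htn : ((m.toNat / 2 : Nat) : Int).toNat = m.toNat / 2 := Int.toNat_natCast _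
  rw [htn]
  by_cases hodd : m.toNat % 2 = 1
  · simp [hodd]
  · have hni : ¬ (max m 0 % 2 = 1) := by omega
    simp [hodd, hni]
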